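-- pv_equiv track=rewrite | github.com/Shafan55/origins-python | src/dqn_agent.py | build_all_actions
-- ===== SOURCE A (Python) =====
-- def build_all_actions(board_size: int):
--     actions = []
--     for from_row in range(board_size):
--         for from_col in range(board_size):
--             for to_row in range(board_size):
--                 for to_col in range(board_size):
--                     if (from_row, from_col) != (to_row, to_col):
--                         actions.append((from_row, from_col, to_row, to_col))
--     return actions
-- ===== SOURCE B (Python) =====
-- def build_all_actions(board_size: int):
--     cells = [(r, c) for r in range(board_size) for c in range(board_size)]
--     pairs = [a + b for a in cells for b in cells]
--     del pairs[::len(cells) + 1]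
--     return pairs
-- ===== Notes on version B (the rewrite author's own statement) =====
-- stated objective: alternative
-- what changed: Instead of A's four nested loops with a per-pair inequality guard, B builds the complete Cartesian product of cells unconditionally and then removes the diagonal (the equal-cell pairs) in one stroke with an extended-slice deletion del pairs[::n2+1], exploiting that in the flat product the diagonal sits exactly at the indices divisible by n2+1.
import Mathlib
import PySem

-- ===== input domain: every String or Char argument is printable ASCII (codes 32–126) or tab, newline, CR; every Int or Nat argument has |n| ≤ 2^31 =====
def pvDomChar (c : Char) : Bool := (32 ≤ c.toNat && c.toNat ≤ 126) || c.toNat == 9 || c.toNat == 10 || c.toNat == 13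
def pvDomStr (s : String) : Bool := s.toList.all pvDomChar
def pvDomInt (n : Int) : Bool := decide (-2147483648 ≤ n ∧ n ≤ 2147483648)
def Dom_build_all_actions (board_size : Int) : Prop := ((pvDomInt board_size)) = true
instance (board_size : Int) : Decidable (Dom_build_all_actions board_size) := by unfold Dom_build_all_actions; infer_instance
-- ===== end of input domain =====

-- B builds the full Cartesian product of cells and then deletes the diagonal (equal-cell pairs)
-- with one strided slice deletion del pairs[::n2+1], instead of A's four nested loops with an
-- inequality guard; objective: alternative.

-- ===== PORT A =====
def build_all_actions (board_size : Int) : List (Int × Int × Int × Int) :=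
  (PySem.List.pyRange 0 board_size 1).foldl (fun acc from_row =>
    (PySem.List.pyRange 0 board_size 1).foldl (fun acc from_col =>
      (PySem.List.pyRange 0 board_size 1).foldl (fun acc to_row =>
        (PySem.List.pyRange 0 board_size 1).foldl (fun acc to_col =>
          if (from_row, from_col) ≠ (to_row, to_col) then
            acc ++ [(from_row, from_col, to_row, to_col)]
          else acc) acc) acc) acc) []

-- ===== PORT B =====
def build_all_actions_alt (board_size : Int) : List (Int × Int × Int × Int) :=
  let cells : List (Int × Int) :=
    (PySem.List.pyRange 0 board_size 1).flatMap (fun r =>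
      (PySem.List.pyRange 0 board_size 1).map (fun c => (r, c)))
  -- 'a + b' concatenates the two 2-tuples into a 4-tuple
  let pairs : List (Int × Int × Int × Int) :=
    cells.flatMap (fun a => cells.map (fun b => (a.1, a.2, b.1, b.2)))
  -- 'del pairs[::len(cells) + 1]' ported by hand (no PySem primitive for slice deletion):
  -- with start 0 and positive step s = len(cells)+1 it removes exactly the indices divisible
  -- by s, i.e. keeps the elements whose index is not a multiple of s — exact here since s ≥ 1
  (pairs.zipIdx.filter (fun p => p.2 % (cells.length + 1) ≠ 0)).map (·.1)

-- ===== PRECONDITION & SPEC =====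
def Spec_build_all_actions (board_size : Int) (out : List (Int × Int × Int × Int)) : Prop := out = build_all_actions_alt board_size
instance (board_size : Int) (out : List (Int × Int × Int × Int)) : Decidable (Spec_build_all_actions board_size out) := by unfold Spec_build_all_actions; infer_instance

-- ===== CLAIM (what is proved, stated in full; the proofs are below) =====
def Claim_equal_build_all_actions : Prop := ∀ (board_size : Int), Dom_build_all_actions board_size → Spec_build_all_actions board_size (build_all_actions board_size)

-- ===== LEMMAS AND PROOFS =====

-- the cell list both programs are about
def pvCells (n : Int) : List (Int × Int) :=
  (PySem.List.pyRange 0 n 1).flatMap (fun r =>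
    (PySem.List.pyRange 0 n 1).map (fun c => (r, c)))

-- the full Cartesian product B starts from
def pvPairs (n : Int) : List (Int × Int × Int × Int) :=
  (pvCells n).flatMap (fun a => (pvCells n).map (fun b => (a.1, a.2, b.1, b.2)))

-- common canonical form: all ordered pairs of distinct cells
def pvCanon (n : Int) : List (Int × Int × Int × Int) :=
  (pvCells n).flatMap (fun a =>
    ((pvCells n).filter (fun b => a ≠ b)).map (fun b => (a.1, a.2, b.1, b.2)))

theorem cells_nodup (n : Int) : (pvCells n).Nodup := by
  unfold pvCells
  rw [List.nodup_flatMap]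
  constructor
  · intro r _
    refine List.Nodup.map ?_ (PySem.List.nodup_pyRange_one 0 n)
    intro a b hab
    simpa using hab
  · refine (PySem.List.pairwise_lt_pyRange_one 0 n).imp ?_
    intro r1 r2 hlt x hx1 hx2
    obtain ⟨c1, -, rfl⟩ := List.mem_map.mp hx1
    obtain ⟨c2, -, hx⟩ := List.mem_map.mp hx2
    have : r2 = r1 := congrArg Prod.fst hx
    omega

theorem A_eq_canon (n : Int) : build_all_actions n = pvCanon n := by
  unfold build_all_actions pvCanon pvCells
  simp only [PySem.List.foldl_append_ite, PySem.List.foldl_append_eq_flatMap,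
    List.nil_append, List.flatMap_assoc, List.flatMap_map, List.map_flatMap,
    List.filter_flatMap, List.filter_map, List.map_map, Function.comp_def]

-- flatMap over a list as flatMap over its indices
theorem flatMap_eq_range {α β : Type} (xs : List α) (d : α) (F : α → List β) :
    xs.flatMap F = (List.range xs.length).flatMap (fun i => F (xs.getD i d)) := by
  induction xs with
  | nil => simp
  | cons x xs ih =>
      simp only [List.length_cons, List.range_succ_eq_map, List.flatMap_cons,
        List.flatMap_map, List.getD_cons_zero, List.getD_cons_succ]
      rw [ih]

-- splitting the flat index range
theorem range_mul (M N : Nat) :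
    List.range (M * N) = (List.range M).flatMap (fun i => (List.range N).map (fun j => i * N + j)) := by
  induction M with
  | zero => simp
  | succ m ih =>
      rw [Nat.succ_mul, List.range_add, ih, List.range_succ, List.flatMap_append]
      simp [Nat.add_comm]

-- keeping the elements whose index is not a multiple of s, as an index flatMap
theorem stride_del {α : Type} (ys : List α) (d : α) (s : Nat) (m : Nat) :
    ((ys.zipIdx m).filter (fun p => p.2 % s ≠ 0)).map (·.1)
      = (List.range ys.length).flatMap (fun k => if (m + k) % s ≠ 0 then [ys.getD k d] else []) := by
  induction ys generalizing m with
  | nil => simp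
  | cons y ys ih =>
      simp only [List.zipIdx_cons, List.filter_cons, List.length_cons,
        List.range_succ_eq_map, List.flatMap_cons, List.flatMap_map,
        List.getD_cons_zero, List.getD_cons_succ, Nat.add_zero]
      have ihm := ih (m + 1)
      by_cases h : m % s = 0
      · simp only [h, ne_eq, not_true_eq_false, decide_false, if_false, Bool.false_eq_true,
          List.nil_append]
        rw [ihm]
        refine List.flatMap_congr ?_
        intro k _
        have : m + 1 + k = m + (k + 1) := by omega
        rw [this]
      · simp only [ne_eq, h, not_false_eq_true, decide_true, if_true, List.map_cons,
          List.singleton_append]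
        rw [ihm]
        congr 1
        refine List.flatMap_congr ?_
        intro k _
        have : m + 1 + k = m + (k + 1) := by omega
        rw [this]

theorem sum_map_const' {α : Type} (l : List α) (c : Nat) : (l.map (fun _ => c)).sum = l.length * c := by
  induction l with
  | nil => simp
  | cons x l ih =>
      simp only [List.map_cons, List.sum_cons, ih, List.length_cons]
      ring

theorem pairs_len (n : Int) : (pvPairs n).length = (pvCells n).length * (pvCells n).length := by
  unfold pvPairs
  rw [List.length_flatMap]
  simp only [List.length_map]
  exact sum_map_const' _ _

-- indexing the flat product at the composite index i * |ys| + j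
theorem getD_prodList {α β γ : Type} (xs : List α) (ys : List β) (f : α → β → γ)
    (d : γ) (dx : α) (dy : β) (i j : Nat) (hi : i < xs.length) (hj : j < ys.length) :
    (xs.flatMap (fun a => ys.map (f a))).getD (i * ys.length + j) d
      = f (xs.getD i dx) (ys.getD j dy) := by
  induction xs generalizing i with
  | nil => simp at hi
  | cons x xs ih =>
      rw [List.flatMap_cons]
      cases i with
      | zero =>
          rw [Nat.zero_mul, Nat.zero_add, List.getD_append _ _ _ _ (by simpa using hj)]
          simp [List.getD, List.getElem?_eq_getElem hj]
      | succ i' =>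
          have hlen : ((ys.map (f x)).length : Nat) ≤ (i' + 1) * ys.length + j := by
            rw [List.length_map]
            calc ys.length ≤ (i' + 1) * ys.length := by nlinarith
            _ ≤ (i' + 1) * ys.length + j := by omega
          rw [List.getD_append_right _ _ _ _ hlen]
          have harith : (i' + 1) * ys.length + j - (ys.map (f x)).length = i' * ys.length + j := by
            rw [List.length_map]
            have : (i' + 1) * ys.length = i' * ys.length + ys.length := by ring
            omega
          rw [harith, List.getD_cons_succ]
          exact ih i' (by simpa using hi)

theorem diag_mod (i j N : Nat) (hi : i < N) (hj : j < N) :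
    (i * N + j) % (N + 1) = 0 ↔ i = j := by
  constructor
  · intro h
    have hd : (N + 1) ∣ (i * N + j) := Nat.dvd_of_mod_eq_zero h
    have hdz : ((N : Int) + 1) ∣ ((i : Int) * N + j) := by
      have h2 := Int.natCast_dvd_natCast.mpr hd
      push_cast at h2
      exact h2
    have heq : (i : Int) * N + j = ((N : Int) + 1) * i + ((j : Int) - i) := by ring
    rw [heq] at hdz
    have h' : ((N : Int) + 1) ∣ ((j : Int) - i) := (dvd_add_right (dvd_mul_right _ _)).mp hdz
    have habs : (j : Int) - i = 0 := by
      by_contra h0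
      have hle := Int.le_of_dvd (abs_pos.mpr h0) ((dvd_abs _ _).mpr h')
      have hlt : |(j : Int) - (i : Int)| < (N : Int) + 1 := by
        rw [abs_lt]
        omega
      exact absurd hlt (not_lt.mpr hle)
    omega
  · rintro rfl
    exact Nat.mod_eq_zero_of_dvd ⟨i, by ring⟩

theorem filter_ne_flatMap (l : List (Int × Int)) (a : Int × Int) :
    (l.filter (fun b => a ≠ b)).map (fun b => (a.1, a.2, b.1, b.2))
      = l.flatMap (fun b => if a ≠ b then [(a.1, a.2, b.1, b.2)] else []) := by
  induction l with
  | nil => simp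
  | cons x l ih =>
      rw [List.filter_cons, List.flatMap_cons, ← ih]
      by_cases h : a ≠ x <;> simp [h]

theorem B_eq_canon (n : Int) : build_all_actions_alt n = pvCanon n := by
  have h1 : build_all_actions_alt n =
      ((pvPairs n).zipIdx.filter (fun p => p.2 % ((pvCells n).length + 1) ≠ 0)).map (·.1) := rfl
  rw [h1, stride_del (pvPairs n) (0, 0, 0, 0) ((pvCells n).length + 1) 0]
  have hnd : (pvCells n).Nodup := cells_nodup n
  have hpl := pairs_len n
  have hpp : pvPairs n = (pvCells n).flatMap (fun a => (pvCells n).map (fun b => (a.1, a.2, b.1, b.2))) := rfl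
  generalize hxs : pvCells n = xs at *
  rw [hpl, range_mul]
  unfold pvCanon
  rw [hxs]
  simp only [filter_ne_flatMap]
  rw [flatMap_eq_range xs (0, 0)]
  simp only [flatMap_eq_range xs (0, 0)]
  rw [List.flatMap_assoc]
  refine List.flatMap_congr ?_
  intro i hi
  rw [List.mem_range] at hi
  rw [List.flatMap_map]
  refine List.flatMap_congr ?_
  intro j hj
  rw [List.mem_range] at hj
  dsimp only
  rw [Nat.zero_add, hpp, getD_prodList xs xs _ (0, 0, 0, 0) (0, 0) (0, 0) i j hi hj]
  by_cases hij : i = j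
  · subst hij
    have hm0 : (i * xs.length + i) % (xs.length + 1) = 0 := (diag_mod i i xs.length hi hi).mpr rfl
    simp [hm0]
  · have hgd : xs.getD i (0, 0) ≠ xs.getD j (0, 0) := by
      rw [List.getD_eq_getElem xs (0, 0) hi, List.getD_eq_getElem xs (0, 0) hj]
      exact fun h => hij (hnd.getElem_inj_iff.mp h)
    have hm : (i * xs.length + j) % (xs.length + 1) ≠ 0 :=
      fun h => hij ((diag_mod i j xs.length hi hj).mp h)
    have hgd' : xs[i]?.getD (0, 0) ≠ xs[j]?.getD (0, 0) := by
      simpa [List.getD_eq_getElem?_getD] using hgd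
    simp [hm, hgd']

-- ===== VERDICT (by name: the statement is the Claim_ definition above) =====
theorem build_all_actions_spec : Claim_equal_build_all_actions := by
  intro n _
  unfold Spec_build_all_actions
  rw [A_eq_canon, B_eq_canon]
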